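-- pv_equiv track=rewrite | github.com/Racemuis/TIGER | GrandChallenge_scripts/tigeralgorithmexample/processing.py | pad_ensure_division
-- ===== SOURCE A (Python) =====
-- def pad_ensure_division(h, w, division):
--
--     def compute_pad(s, d):
--         if s % d != 0:
--             p = 0
--             while True:
--                 if (s + p) % d == 0:
--                     return p
--                 p += 1
--         return 0
--
--     py = compute_pad(h, division)
--     px = compute_pad(w, division)
--     padding = (0, py), (0, px)
--     return padding
-- ===== SOURCE B (Python) =====
-- def pad_ensure_division(h, w, division):
--     d = abs(division)
--     return ((0, (-h) % d), (0, (-w) % d))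
-- ===== Notes on version B (the rewrite author's own statement) =====
-- stated objective: faster
-- what changed: Replaces the increment-and-test search loop for the padding with the closed-form modular expression (-s) % abs(division).
import Mathlib
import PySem

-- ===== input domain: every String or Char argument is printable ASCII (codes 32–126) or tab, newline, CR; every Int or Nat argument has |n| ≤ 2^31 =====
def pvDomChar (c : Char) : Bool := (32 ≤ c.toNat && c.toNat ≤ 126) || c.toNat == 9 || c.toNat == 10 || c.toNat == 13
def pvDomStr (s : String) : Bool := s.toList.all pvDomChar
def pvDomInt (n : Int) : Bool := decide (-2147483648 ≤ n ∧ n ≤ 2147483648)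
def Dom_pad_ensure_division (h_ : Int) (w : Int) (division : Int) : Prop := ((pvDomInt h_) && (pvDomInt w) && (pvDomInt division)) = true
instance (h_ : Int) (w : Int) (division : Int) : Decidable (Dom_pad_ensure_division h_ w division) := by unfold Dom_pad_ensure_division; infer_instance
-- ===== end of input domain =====

-- B replaces A's increment-and-test search loop with the closed form (-s) % abs(division) (asymptotically faster).

-- ===== PORT A =====
-- the 'while True' loop; fuel natAbs division + 1 is enough: under Pre_ (division ≠ 0)
-- the loop returns after at most |division| iterations, so the fuel-exhausted branch is unreachable
def pvPadLoop (s d : Int) : Nat → Int → Int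
  | 0, p => p
  | n+1, p => if PySem.Int.mod (s + p) d = 0 then p else pvPadLoop s d n (p + 1)

def pvComputePad (s d : Int) : Int :=
  if PySem.Int.mod s d ≠ 0 then pvPadLoop s d (d.natAbs + 1) 0 else 0

def pad_ensure_division (h_ : Int) (w : Int) (division : Int) : List (List Int) :=
  [[0, pvComputePad h_ division], [0, pvComputePad w division]]

-- ===== PORT B =====
def pad_ensure_division_alt (h_ : Int) (w : Int) (division : Int) : List (List Int) :=
  let d : Int := (division.natAbs : Int)
  [[0, PySem.Int.mod (-h_) d], [0, PySem.Int.mod (-w) d]]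

-- ===== PRECONDITION & SPEC =====
-- Pre_ excludes division = 0, on which Python A raises ZeroDivisionError (s % 0).
def Pre_pad_ensure_division (h_ : Int) (w : Int) (division : Int) : Prop := division ≠ 0
instance (h_ : Int) (w : Int) (division : Int) : Decidable (Pre_pad_ensure_division h_ w division) := by unfold Pre_pad_ensure_division; infer_instance
def pvWitness_pad_ensure_division : Int × Int × Int := (5, 7, 3)

def Spec_pad_ensure_division (h_ : Int) (w : Int) (division : Int) (out : List (List Int)) : Prop := out = pad_ensure_division_alt h_ w division
instance (h_ : Int) (w : Int) (division : Int) (out : List (List Int)) : Decidable (Spec_pad_ensure_division h_ w division out) := by unfold Spec_pad_ensure_division; infer_instance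

-- ===== CLAIM (what is proved, stated in full; the proofs are below) =====
def Claim_equal_pad_ensure_division : Prop := ∀ (h_ : Int) (w : Int) (division : Int), Dom_pad_ensure_division h_ w division → Pre_pad_ensure_division h_ w division → Spec_pad_ensure_division h_ w division (pad_ensure_division h_ w division)

-- ===== LEMMAS AND PROOFS =====

-- the loop returns t = (-s) % |d|, the least nonnegative p with d ∣ (s + p)
theorem pvPadLoop_eq (s d : Int) (hd : d ≠ 0) :
    ∀ (n : Nat) (p : Int), 0 ≤ p → p ≤ PySem.Int.mod (-s) (d.natAbs : Int) →
      PySem.Int.mod (-s) (d.natAbs : Int) - p < n →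
      pvPadLoop s d n p = PySem.Int.mod (-s) (d.natAbs : Int) := by
  set D : Int := (d.natAbs : Int) with hD
  have hDpos : 0 < D := by simp [hD]; omega
  set t : Int := PySem.Int.mod (-s) D with htdef
  have htmod : t = (-s) % D := by rw [htdef, PySem.Int.mod_eq_emod_of_pos hDpos]
  have hdvd_st : D ∣ (s + t) := by
    have : (-s) % D = -s - D * ((-s) / D) := by rw [Int.emod_def]
    rw [htmod, this]; exact ⟨-((-s)/D), by ring⟩
  have htlt : t < D := by rw [htmod]; exact Int.emod_lt_of_pos _ hDpos
  intro n
  induction n with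
  | zero => intro p _ hpt hlt; omega
  | succ n ih =>
    intro p hp0 hpt hlt
    by_cases hz : PySem.Int.mod (s + p) d = 0
    · have hdvd : D ∣ (s + p) := by
        rw [PySem.Int.mod_eq_zero_iff_dvd] at hz
        rw [hD]; exact (Int.natAbs_dvd).mpr hz
      have hpt' : D ∣ (p - t) := by
        have := Int.dvd_sub hdvd hdvd_st
        simpa [show s + p - (s + t) = p - t by ring] using this
      have : p - t = 0 := Int.eq_zero_of_abs_lt_dvd hpt' (by rw [abs_lt]; omega)
      simp [pvPadLoop, hz]; omega
    · have hpne : p ≠ t := by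
        intro he
        exact hz (by rw [PySem.Int.mod_eq_zero_iff_dvd, ← Int.natAbs_dvd, ← hD, he]; exact hdvd_st)
      simp only [pvPadLoop, if_neg hz]
      exact ih (p + 1) (by omega) (by omega) (by omega)

theorem pvComputePad_eq (s d : Int) (hd : d ≠ 0) :
    pvComputePad s d = PySem.Int.mod (-s) (d.natAbs : Int) := by
  set D : Int := (d.natAbs : Int) with hD
  have hDpos : 0 < D := by simp [hD]; omega
  have ht0 : 0 ≤ PySem.Int.mod (-s) D := by
    rw [PySem.Int.mod_eq_emod_of_pos hDpos]; exact Int.emod_nonneg _ (by omega)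
  have htlt : PySem.Int.mod (-s) D < D := by
    rw [PySem.Int.mod_eq_emod_of_pos hDpos]; exact Int.emod_lt_of_pos _ hDpos
  by_cases hz : PySem.Int.mod s d = 0
  · have : D ∣ (-s) := by
      rw [PySem.Int.mod_eq_zero_iff_dvd] at hz
      rw [hD]; exact (Int.natAbs_dvd).mpr (Dvd.dvd.neg_right hz)
    have : PySem.Int.mod (-s) D = 0 := by rw [PySem.Int.mod_eq_zero_iff_dvd]; exact this
    simp [pvComputePad, hz, this]
  · rw [pvComputePad, if_pos hz]
    exact pvPadLoop_eq s d hd (d.natAbs + 1) 0 le_rfl ht0 (by rw [← hD]; omega)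

-- ===== VERDICT (by name: the statement is the Claim_ definition above) =====
theorem pad_ensure_division_spec : Claim_equal_pad_ensure_division := by
  intro h_ w division _ hpre
  show _ = _
  simp [pad_ensure_division, pad_ensure_division_alt,
    pvComputePad_eq h_ division hpre, pvComputePad_eq w division hpre]
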